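-- pv_equiv track=rewrite | github.com/mingliangzhang2018/PGPS | dataset/text_aug.py | get_seq_points
-- ===== SOURCE A (Python) =====
-- def get_seq_points(class_tag):
--     id_list = []
--     begin_point_id = end_point_id = None
--     for id, token in enumerate(class_tag):
--         if token == '[POINT]':
--             if begin_point_id is None:
--                 begin_point_id = id
--         elif not begin_point_id is None and end_point_id is None:
--             end_point_id = id
--             id_list.append([begin_point_id, end_point_id])
--             begin_point_id = end_point_id = None
--     if not begin_point_id is None and end_point_id is None:
--         id_list.append([begin_point_id, len(class_tag)])
--
--     return id_list[-1][0], id_list[-1][1]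
-- ===== SOURCE B (Python) =====
-- def get_seq_points(class_tag):
--     end = len(class_tag) - class_tag[::-1].index('[POINT]')
--     begin = end - 1
--     while begin > 0 and class_tag[begin - 1] == '[POINT]':
--         begin -= 1
--     return begin, end
-- ===== Notes on version B (the rewrite author's own statement) =====
-- stated objective: simpler
-- what changed: Instead of collecting every [POINT] run left-to-right with begin/end state and taking the last list element, B locates the last [POINT] via reversed-list index() and walks back over the contiguous run; Pre_ excludes inputs with no [POINT], on which A raises IndexError (and B raises ValueError).
import Mathlib
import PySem

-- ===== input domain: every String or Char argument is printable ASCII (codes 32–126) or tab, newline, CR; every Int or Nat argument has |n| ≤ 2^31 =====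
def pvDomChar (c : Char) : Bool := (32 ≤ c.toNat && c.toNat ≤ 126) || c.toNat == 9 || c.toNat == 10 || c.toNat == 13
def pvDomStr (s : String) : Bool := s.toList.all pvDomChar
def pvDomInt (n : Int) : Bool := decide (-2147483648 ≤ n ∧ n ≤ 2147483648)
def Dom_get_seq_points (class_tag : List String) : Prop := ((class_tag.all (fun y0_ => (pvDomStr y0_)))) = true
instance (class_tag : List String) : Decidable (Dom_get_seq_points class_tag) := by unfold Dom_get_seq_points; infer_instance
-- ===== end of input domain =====

-- B finds the span of the last '[POINT]' run via reversed-list index() plus a backward walk,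
-- instead of A's forward pass that collects every run and returns the last one (objective: simpler).

-- ===== PORT A =====
-- loop body of A: state = (id_list, begin_point_id, end_point_id); p = (id, token)
def pvStepA (st : List (Int × Int) × Option Int × Option Int) (p : Int × String) :
    List (Int × Int) × Option Int × Option Int :=
  if p.2 = "[POINT]" then
    if st.2.1 = none then (st.1, some p.1, st.2.2) else st
  else if st.2.1 ≠ none ∧ st.2.2 = none then
    -- begin_point_id is not None here, so `.getD 0` is exact
    (st.1 ++ [(st.2.1.getD 0, p.1)], none, none)
  else st

def get_seq_points (class_tag : List String) : Int × Int :=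
  let s := (PySem.List.enumerate class_tag 0).foldl pvStepA ([], none, none)
  let id_list := if s.2.1 ≠ none ∧ s.2.2 = none
    then s.1 ++ [(s.2.1.getD 0, (class_tag.length : Int))] else s.1
  -- id_list[-1]: IndexError on empty id_list is excluded by Pre_ (default never used there)
  (PySem.List.pyGet? id_list (-1)).getD (0, 0)

-- ===== PORT B =====
-- B's while loop, over begin: decrement while begin > 0 and class_tag[begin-1] == '[POINT]'
def pvBeginLoop (class_tag : List String) : Nat → Nat
  | 0 => 0
  | b + 1 => if class_tag.getD b "" = "[POINT]" then pvBeginLoop class_tag b else b + 1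

def get_seq_points_alt (class_tag : List String) : Int × Int :=
  match PySem.List.index? class_tag.reverse "[POINT]" with
  | none => (0, 0)  -- class_tag[::-1].index(...) raises ValueError here; excluded by Pre_
  | some j =>
    let e := class_tag.length - j
    ((pvBeginLoop class_tag (e - 1) : Int), (e : Int))

-- ===== PRECONDITION & SPEC =====
-- A raises IndexError (id_list[-1] on an empty list) when '[POINT]' never occurs; B raises ValueError there.
def Pre_get_seq_points (class_tag : List String) : Prop := "[POINT]" ∈ class_tag
instance (class_tag : List String) : Decidable (Pre_get_seq_points class_tag) := by
  unfold Pre_get_seq_points; infer_instance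
def pvWitness_get_seq_points : List String := ["[POINT]"]

def Spec_get_seq_points (class_tag : List String) (out : Int × Int) : Prop := out = get_seq_points_alt class_tag
instance (class_tag : List String) (out : Int × Int) : Decidable (Spec_get_seq_points class_tag out) := by unfold Spec_get_seq_points; infer_instance

-- ===== CLAIM (what is proved, stated in full; the proofs are below) =====
def Claim_equal_get_seq_points : Prop := ∀ (class_tag : List String), Dom_get_seq_points class_tag → Pre_get_seq_points class_tag → Spec_get_seq_points class_tag (get_seq_points class_tag)

-- ===== LEMMAS AND PROOFS =====

-- A's fold state and fixed-up id_list, named for the proofs (definitionally what get_seq_points computes)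
def pvFold (class_tag : List String) : List (Int × Int) × Option Int × Option Int :=
  (PySem.List.enumerate class_tag 0).foldl pvStepA ([], none, none)
def pvAfin (class_tag : List String) : List (Int × Int) :=
  let s := pvFold class_tag
  if s.2.1 ≠ none ∧ s.2.2 = none
    then s.1 ++ [(s.2.1.getD 0, (class_tag.length : Int))] else s.1

-- end of the last '[POINT]' run, as a backward scan (proof abstraction shared by both sides)
def pvLoop1 (class_tag : List String) : Nat → Nat
  | 0 => 0
  | k + 1 => if class_tag.getD k "" ≠ "[POINT]" then pvLoop1 class_tag k else k + 1

-- length of the trailing '[POINT]' run, and of the trailing non-'[POINT]' run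
def pvRun (l : List String) : Nat := (l.reverse.takeWhile (fun t => t = "[POINT]")).length
def pvNRun (l : List String) : Nat := (l.reverse.takeWhile (fun t => ¬(t = "[POINT]"))).length

theorem pvRun_append_pos (l : List String) : pvRun (l ++ ["[POINT]"]) = pvRun l + 1 := by
  simp [pvRun]

theorem pvRun_append_neg (l : List String) (x : String) (hx : x ≠ "[POINT]") :
    pvRun (l ++ [x]) = 0 := by
  simp [pvRun, hx]

theorem pvNRun_append_pos (l : List String) : pvNRun (l ++ ["[POINT]"]) = 0 := by
  simp [pvNRun]

theorem pvNRun_append_neg (l : List String) (x : String) (hx : x ≠ "[POINT]") :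
    pvNRun (l ++ [x]) = pvNRun l + 1 := by
  simp [pvNRun, hx]

theorem pvFold_append (l : List String) (x : String) :
    pvFold (l ++ [x]) = pvStepA (pvFold l) ((l.length : Int), x) := by
  simp [pvFold, PySem.List.enumerate_append, PySem.List.enumerate_cons]

theorem pvGet_append (l : List String) (x : String) (k : Nat) (hk : k < l.length) :
    (l ++ [x])[k]? = l[k]? := List.getElem?_append_left hk

theorem pvLoop1_stable (l : List String) (x : String) :
    ∀ k, k ≤ l.length → pvLoop1 (l ++ [x]) k = pvLoop1 l k := by
  intro k
  induction k with
  | zero => intro _; rfl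
  | succ k ih =>
    intro hk
    have hk' : k < l.length := hk
    simp [pvLoop1, pvGet_append l x k hk', ih (Nat.le_of_lt hk')]

theorem pvBeginLoop_stable (l : List String) (x : String) :
    ∀ k, k ≤ l.length → pvBeginLoop (l ++ [x]) k = pvBeginLoop l k := by
  intro k
  induction k with
  | zero => intro _; rfl
  | succ k ih =>
    intro hk
    have hk' : k < l.length := hk
    simp [pvBeginLoop, pvGet_append l x k hk', ih (Nat.le_of_lt hk')]

theorem pvLoop1_le (l : List String) : ∀ k, pvLoop1 l k ≤ k := by
  intro k
  induction k with
  | zero => exact Nat.le_refl _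
  | succ k ih =>
    simp only [pvLoop1]
    split
    · exact Nat.le_succ_of_le ih
    · exact Nat.le_refl _

theorem pvBeginLoop_full (l : List String) : pvBeginLoop l l.length = l.length - pvRun l := by
  induction l using List.reverseRecOn with
  | nil => rfl
  | append_singleton l x ih =>
    by_cases hx : x = "[POINT]"
    · subst hx
      have hlen : (l ++ ["[POINT]"]).length = l.length + 1 := by simp
      rw [hlen]
      simp [pvBeginLoop, pvBeginLoop_stable l _ l.length (Nat.le_refl _), ih,
        pvRun_append_pos]
    · have hlen : (l ++ [x]).length = l.length + 1 := by simp
      rw [hlen]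
      simp [pvBeginLoop, hx, pvRun_append_neg l x hx]

theorem pvLoop1_full (l : List String) : pvLoop1 l l.length = l.length - pvNRun l := by
  induction l using List.reverseRecOn with
  | nil => rfl
  | append_singleton l x ih =>
    by_cases hx : x = "[POINT]"
    · subst hx
      have hlen : (l ++ ["[POINT]"]).length = l.length + 1 := by simp
      rw [hlen]
      simp [pvLoop1, pvNRun_append_pos]
    · have hlen : (l ++ [x]).length = l.length + 1 := by simp
      rw [hlen]
      have hle : pvNRun l ≤ l.length := by
        simpa [pvNRun] using
          (List.takeWhile_prefix (l := l.reverse) (p := fun t => ¬(t = "[POINT]"))).length_le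
      have e : pvLoop1 (l ++ [x]) (l.length + 1) = pvLoop1 (l ++ [x]) l.length := by
        simp [pvLoop1, hx]
      rw [e, pvLoop1_stable l x l.length (Nat.le_refl _), ih, pvNRun_append_neg l x hx]
      omega

theorem pvIndexRev (l : List String) (h : "[POINT]" ∈ l) :
    PySem.List.index? l.reverse "[POINT]" = some (pvNRun l) := by
  induction l using List.reverseRecOn with
  | nil => simp at h
  | append_singleton l x ih =>
    by_cases hx : x = "[POINT]"
    · subst hx
      rw [List.reverse_append]
      simpa [pvNRun] using PySem.List.index?_cons_self (x := "[POINT]") (xs := l.reverse)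
    · have hmem : "[POINT]" ∈ l := by
        rcases List.mem_append.mp h with h' | h'
        · exact h'
        · simp at h'; exact absurd h'.symm hx
      rw [List.reverse_append]
      have := PySem.List.index?_cons_of_ne (x := x) (v := "[POINT]") (xs := l.reverse) hx
      simp only [List.reverse_singleton, List.singleton_append] at *
      rw [this, ih hmem, pvNRun_append_neg l x hx]
      rfl

theorem pvLoop1_pos (l : List String) :
    ∀ k, (∃ j, j < k ∧ l[j]?.getD "" = "[POINT]") → pvLoop1 l k ≠ 0 := by
  intro k
  induction k with
  | zero => rintro ⟨j, hj, _⟩; omega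
  | succ k ih =>
    rintro ⟨j, hj, hjP⟩
    by_cases h : l[k]?.getD "" = "[POINT]"
    · simp [pvLoop1, h]
    · have hjk : j < k := by
        rcases Nat.lt_succ_iff_lt_or_eq.mp hj with h' | h'
        · exact h'
        · exact absurd (h' ▸ hjP) h
      simpa [pvLoop1, h] using ih ⟨j, hjk, hjP⟩

theorem pvLoop1_stop (l : List String) :
    ∀ k, pvLoop1 l k ≠ 0 → l.getD (pvLoop1 l k - 1) "" = "[POINT]" := by
  intro k
  induction k with
  | zero => intro h; exact absurd rfl h
  | succ k ih =>
    intro h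
    by_cases hk : l[k]?.getD "" = "[POINT]"
    · have e : pvLoop1 l (k + 1) = k + 1 := by simp [pvLoop1, List.getD_eq_getElem?_getD, hk]
      rw [e]
      simpa [List.getD_eq_getElem?_getD] using hk
    · have e : pvLoop1 l (k + 1) = pvLoop1 l k := by simp [pvLoop1, List.getD_eq_getElem?_getD, hk]
      rw [e]; exact ih (by rwa [e] at h)

-- the combined invariant over A's fold state and the backward-scan abstraction
theorem pvInv (l : List String) :
    (pvFold l).2.2 = none ∧
    (pvFold l).2.1 = (if pvRun l = 0 then none else some ((l.length - pvRun l : Nat) : Int)) ∧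
    (pvAfin l).getLast? =
      (if pvLoop1 l l.length = 0 then none
       else some (((pvBeginLoop l (pvLoop1 l l.length) : Nat) : Int),
                  ((pvLoop1 l l.length : Nat) : Int))) := by
  induction l using List.reverseRecOn with
  | nil => refine ⟨rfl, rfl, rfl⟩
  | append_singleton l x ih =>
    obtain ⟨ihE, ihB, ihL⟩ := ih
    have hF := pvFold_append l x
    have hlen : (l ++ [x]).length = l.length + 1 := by simp
    by_cases hx : x = "[POINT]"
    · subst hx
      -- token is '[POINT]': A may set begin; the backward scan stops at the end immediately
      have hB' : (pvFold (l ++ ["[POINT]"])).2.1 = some ((l.length - pvRun l : Nat) : Int) := by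
        by_cases h0 : pvRun l = 0
        · rw [hF]; simp [pvStepA, ihB, h0]
        · rw [hF]; simp [pvStepA, ihB, h0]
      have hE' : (pvFold (l ++ ["[POINT]"])).2.2 = none := by
        by_cases h0 : pvRun l = 0
        · rw [hF]; simp [pvStepA, ihB, h0, ihE]
        · rw [hF]; simp [pvStepA, ihB, h0, ihE]
      refine ⟨hE', ?_, ?_⟩
      · rw [hB', pvRun_append_pos, hlen]
        have : l.length + 1 - (pvRun l + 1) = l.length - pvRun l := by omega
        simp [this]
      · have h1 : pvLoop1 (l ++ ["[POINT]"]) (l ++ ["[POINT]"]).length = l.length + 1 := by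
          rw [hlen]; simp [pvLoop1]
        have h2 : pvBeginLoop (l ++ ["[POINT]"]) (l.length + 1) = l.length - pvRun l := by
          simp [pvBeginLoop, pvBeginLoop_stable l _ l.length (Nat.le_refl _), pvBeginLoop_full]
        rw [h1, h2]
        have : (pvAfin (l ++ ["[POINT]"])).getLast? =
            some (((l.length - pvRun l : Nat) : Int), ((l.length + 1 : Nat) : Int)) := by
          simp [pvAfin, hB', hE', hlen]
        rw [this]
        simp
    · -- token differs: A closes the pending run (which the old fixup had already closed), B skips it
      have hAfin : pvAfin (l ++ [x]) = pvAfin l := by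
        by_cases h0 : pvRun l = 0
        · simp [pvAfin, hF, pvStepA, hx, ihB, h0, ihE]
        · simp [pvAfin, hF, pvStepA, hx, ihB, h0, ihE]
      have h1 : pvLoop1 (l ++ [x]) (l ++ [x]).length = pvLoop1 l l.length := by
        rw [hlen]
        simp [pvLoop1, hx, pvLoop1_stable l x l.length (Nat.le_refl _)]
      refine ⟨?_, ?_, ?_⟩
      · by_cases h0 : pvRun l = 0
        · rw [hF]; simp [pvStepA, hx, ihB, h0, ihE]
        · rw [hF]; simp [pvStepA, hx, ihB, h0, ihE]
      · rw [pvRun_append_neg l x hx]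
        by_cases h0 : pvRun l = 0
        · rw [hF]; simp [pvStepA, hx, ihB, h0, ihE]
        · rw [hF]; simp [pvStepA, hx, ihB, h0, ihE]
      · rw [hAfin, h1, ihL]
        by_cases hk : pvLoop1 l l.length = 0
        · simp [hk]
        · have hle : pvLoop1 l l.length ≤ l.length := pvLoop1_le l l.length
          simp [hk, pvBeginLoop_stable l x _ hle]

-- ===== VERDICT (by name: the statement is the Claim_ definition above) =====
theorem get_seq_points_spec : Claim_equal_get_seq_points := by
  intro ct _ hpre
  unfold Spec_get_seq_points
  obtain ⟨_, _, hL⟩ := pvInv ct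
  have hk : pvLoop1 ct ct.length ≠ 0 := by
    obtain ⟨j, hj, hjeq⟩ := List.mem_iff_getElem.mp hpre
    exact pvLoop1_pos ct ct.length ⟨j, hj, by simp [List.getElem?_eq_getElem hj, hjeq]⟩
  have hA : get_seq_points ct = (PySem.List.pyGet? (pvAfin ct) (-1)).getD (0, 0) := rfl
  have he : ct.length - pvNRun ct = pvLoop1 ct ct.length := (pvLoop1_full ct).symm
  have hstep : pvBeginLoop ct (pvLoop1 ct ct.length - 1) = pvBeginLoop ct (pvLoop1 ct ct.length) := by
    obtain ⟨m, hm⟩ := Nat.exists_eq_succ_of_ne_zero hk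
    rw [hm]
    have := pvLoop1_stop ct ct.length hk
    rw [hm] at this
    simp at this
    simp [pvBeginLoop, this]
  rw [hA, PySem.List.pyGet?_neg_one, hL]
  simp only [get_seq_points_alt]
  rw [pvIndexRev ct hpre]
  simp [he, hk, hstep]
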